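-- pv_equiv track=rewrite | github.com/milicamilutinovic/cryptoapp | CryptoApp/wwwroot/received/main.py | generisi_uvlacenja
-- ===== SOURCE A (Python) =====
-- def generisi_uvlacenja(broj_prve_grupe):
--
--     broj_elemenata = broj_prve_grupe * 2 - 1
--     sredina = broj_elemenata // 2
--     uvlacenja = []
--
--     for i in range(broj_elemenata):
--       if i < sredina:
--         uvlacenje = 3 + 3 * (sredina - i)
--       elif i > sredina:
--         uvlacenje = 3 + 3 * (i - sredina)
--       else:
--         uvlacenje = 3
--       uvlacenja.append(uvlacenje)
--
--     return uvlacenja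
-- ===== SOURCE B (Python) =====
-- def generisi_uvlacenja(broj_prve_grupe):
--     # Build only the right half and mirror it: desna[::-1] + [3] + desna.
--     if broj_prve_grupe < 1:
--         return []
--     sredina = broj_prve_grupe - 1
--     desna = [3 + 3 * (k + 1) for k in range(sredina)]
--     return desna[::-1] + [3] + desna
-- ===== Notes on version B (the rewrite author's own statement) =====
-- stated objective: alternative
-- what changed: Replaces the single index loop with a three-way distance branch by building only the ascending right half once and returning its reverse ++ [3] ++ itself, exploiting the palindromic symmetry.
import Mathlib
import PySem

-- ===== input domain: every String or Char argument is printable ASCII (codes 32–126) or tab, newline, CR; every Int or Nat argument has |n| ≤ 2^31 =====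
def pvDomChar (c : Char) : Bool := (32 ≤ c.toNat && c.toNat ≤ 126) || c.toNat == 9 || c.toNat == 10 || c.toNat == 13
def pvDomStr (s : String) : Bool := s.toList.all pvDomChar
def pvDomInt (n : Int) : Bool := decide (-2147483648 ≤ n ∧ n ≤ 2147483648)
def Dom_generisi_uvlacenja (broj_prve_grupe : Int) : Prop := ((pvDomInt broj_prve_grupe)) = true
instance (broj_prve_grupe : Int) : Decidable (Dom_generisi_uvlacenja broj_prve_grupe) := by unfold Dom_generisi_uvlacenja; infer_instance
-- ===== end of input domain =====

-- B builds only the right half and mirrors it (alternative decomposition, same cost); equal return values proved below.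

-- ===== PORT A =====
def generisi_uvlacenja (broj_prve_grupe : Int) : List Int :=
  let broj_elemenata := broj_prve_grupe * 2 - 1
  let sredina := PySem.Int.floordiv broj_elemenata 2
  (PySem.List.pyRange 0 broj_elemenata 1).foldl
    (fun uvlacenja i =>
      uvlacenja ++ [if i < sredina then 3 + 3 * (sredina - i)
                    else if i > sredina then 3 + 3 * (i - sredina)
                    else 3]) []

-- ===== PORT B =====
def generisi_uvlacenja_alt (broj_prve_grupe : Int) : List Int :=
  if broj_prve_grupe < 1 then []
  else
    let sredina := broj_prve_grupe - 1
    let desna := (PySem.List.pyRange 0 sredina 1).map (fun k => 3 + 3 * (k + 1))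
    desna.reverse ++ [3] ++ desna

-- ===== PRECONDITION & SPEC =====
def Spec_generisi_uvlacenja (broj_prve_grupe : Int) (out : List Int) : Prop := out = generisi_uvlacenja_alt broj_prve_grupe
instance (broj_prve_grupe : Int) (out : List Int) : Decidable (Spec_generisi_uvlacenja broj_prve_grupe out) := by unfold Spec_generisi_uvlacenja; infer_instance

-- ===== CLAIM (what is proved, stated in full; the proofs are below) =====
def Claim_equal_generisi_uvlacenja : Prop := ∀ (broj_prve_grupe : Int), Dom_generisi_uvlacenja broj_prve_grupe → Spec_generisi_uvlacenja broj_prve_grupe (generisi_uvlacenja broj_prve_grupe)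

-- ===== LEMMAS AND PROOFS =====

theorem generisi_uvlacenja_eq (b : Int) :
    generisi_uvlacenja b = generisi_uvlacenja_alt b := by
  unfold generisi_uvlacenja generisi_uvlacenja_alt
  rw [PySem.List.foldl_append_singleton_eq_map, PySem.List.pyRange_one]
  by_cases hb : b < 1
  · have h1 : (b * 2 - 1 - 0).toNat = 0 := by omega
    have h2 : (b - 1 - 0).toNat = 0 := by omega
    simp [hb]
    omega
  · -- b ≥ 1 : write b = m + 1
    obtain ⟨m, hm⟩ : ∃ m : Nat, b = (m : Int) + 1 := ⟨(b - 1).toNat, by omega⟩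
    subst hm
    simp only [if_neg hb, PySem.List.pyRange_one]
    have hmid : PySem.Int.floordiv (((m : Int) + 1) * 2 - 1) 2 = (m : Int) := by
      rw [PySem.Int.floordiv_eq_iff_of_pos (by omega)]
      omega
    have hn1 : (((m : Int) + 1) * 2 - 1 - 0).toNat = (m + 1) + m := by omega
    have hn2 : ((m : Int) + 1 - 1 - 0).toNat = m := by omega
    rw [hmid, hn1, hn2, List.range_add, List.range_succ]
    simp only [List.map_append, List.map_map, List.map_cons, List.map_nil]
    have hcenter : ((if (0 : Int) + (m : Int) < (m : Int) then 3 + 3 * ((m : Int) - (0 + (m : Int)))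
        else if (0 : Int) + (m : Int) > (m : Int) then 3 + 3 * (0 + (m : Int) - (m : Int)) else 3)) = (3 : Int) := by
      simp
    rw [hcenter]
    have hright : (List.range m).map ((fun i : Int =>
          if i < (m : Int) then 3 + 3 * ((m : Int) - i)
          else if i > (m : Int) then 3 + 3 * (i - (m : Int)) else 3) ∘
        (fun k : Nat => (0 : Int) + k) ∘ (fun x : Nat => (m + 1) + x))
        = (List.range m).map ((fun k : Int => 3 + 3 * (k + 1)) ∘ (fun k : Nat => (0 : Int) + k)) := by
      apply List.map_congr_left
      intro j _
      have h1 : ¬ ((0 : Int) + ((m + 1 + j : Nat) : Int) < (m : Int)) := by push_cast; omega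
      have h2 : (0 : Int) + ((m + 1 + j : Nat) : Int) > (m : Int) := by push_cast; omega
      simp only [Function.comp, h1, h2, if_pos, if_false]
      push_cast; ring
    rw [hright]
    have hleft : (List.range m).map ((fun i : Int =>
          if i < (m : Int) then 3 + 3 * ((m : Int) - i)
          else if i > (m : Int) then 3 + 3 * (i - (m : Int)) else 3) ∘
        (fun k : Nat => (0 : Int) + k))
        = ((List.range m).map ((fun k : Int => 3 + 3 * (k + 1)) ∘ (fun k : Nat => (0 : Int) + k))).reverse := by
      apply List.ext_getElem
      · simp
      · intro i h1 h2
        simp only [List.length_map, List.length_range] at h1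
        rw [List.getElem_reverse]
        simp only [List.getElem_map, List.getElem_range, Function.comp,
          List.length_map, List.length_range]
        have hlt : (0 : Int) + (i : Int) < (m : Int) := by omega
        rw [if_pos hlt]
        omega
    rw [hleft]
    simp [List.append_assoc]

-- ===== VERDICT (by name: the statement is the Claim_ definition above) =====
theorem generisi_uvlacenja_spec : Claim_equal_generisi_uvlacenja := by
  intro b _
  unfold Spec_generisi_uvlacenja
  exact generisi_uvlacenja_eq b
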